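/- GENERATED by tools/from_farm_form.py from prooffarm-gif/accepted/_sub_I_65535_1/Proof.lean (a worked proof of the farm's unit `_sub_I_65535_1`,
   accepted by the verdict) — do not edit. -/
import Gif.Spec.Units.sub_I_65535_1
import Asan.CheckWalk
/- PORTED (renaming and numbers only) from the heap toy's farm.toyh/worked/_sub_I_65535_1/Proof.lean:
   table 141640H -> 141F00H, 1 descriptor -> 8 (eight shadow windows), entry 105180H -> 10B300H. -/

open X86 X86.User Asan ProgX.Base

set_option maxRecDepth 4000
set_option maxHeartbeats 4000000

namespace Gif.Spec.sub_I_65535_1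

/-- Two memories that agree on a window still agree on it after the SAME one-byte store to both (wherever the store goes). -/
theorem ctor_eqOn_write {lo hi : Nat} {m m' : Mem} (h : Mem.EqOn lo hi m m') (a : Word) (v : Byte) :
    Mem.EqOn lo hi (m.write a v) (m'.write a v) := by
  intro x hx1 hx2
  by_cases e : a = x
  · subst e
    rw [Mem.read_write_same, Mem.read_write_same]
  · rw [Mem.read_write_other _ _ _ _ e, Mem.read_write_other _ _ _ _ e]
    exact h x hx1 hx2

/-- The same for the byte-fill loop of the runtime (`fillMem`: `k` one-byte stores). -/
theorem ctor_eqOn_fillMem {lo hi : Nat} {m m' : Mem} (h : Mem.EqOn lo hi m m') (g : Nat) (v : Byte) (k : Nat) :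
    Mem.EqOn lo hi (fillMem m g v k) (fillMem m' g v k) := by
  induction k generalizing m m' g with
  | zero => exact h
  | succ k ih =>
    simp only [fillMem]
    exact ih (ctor_eqOn_write h _ _) (g + 1)

/-- The same for the stores of one registration (`registerOne`: they do not depend on the memory's content). -/
theorem ctor_eqOn_registerOne {lo hi : Nat} {m m' : Mem} (h : Mem.EqOn lo hi m m') (d : GlobalDesc) :
    Mem.EqOn lo hi (registerOne m d) (registerOne m' d) := by
  unfold registerOne
  apply ctor_eqOn_fillMem
  by_cases e : (d.beg + d.size) % 8 = 0
  · rw [if_pos e, if_pos e]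
    exact h
  · rw [if_neg e, if_neg e]
    exact ctor_eqOn_write h _ _

/-- **`registerMem` respects agreement on a window**: the store sequence of `__asan_register_globals` is the same whatever the
memory holds, so two memories with the same shadow have the same shadow afterwards. This is what turns the callee's exact post
(`v.mem = registerMem s.mem descs`, `s` = the state after OUR push of the return address) into the constructor's post about `u.mem`. -/
theorem ctor_eqOn_registerMem {lo hi : Nat} {m m' : Mem} (h : Mem.EqOn lo hi m m') (ds : List GlobalDesc) :
    Mem.EqOn lo hi (registerMem m ds) (registerMem m' ds) := by
  induction ds generalizing m m' with
  | nil => exact h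
  | cons d ds ih =>
    have e1 : registerMem m (d :: ds) = registerMem (registerOne m d) ds := rfl
    have e2 : registerMem m' (d :: ds) = registerMem (registerOne m' d) ds := rfl
    rw [e1, e2]
    exact ih (ctor_eqOn_registerOne h d)

/-- **The descriptor table survives a store into the stack region**: the table of this image lies at `[141F00H, 142100H)`, far
below the stack `[700000H, 800000H)`, so the `call`'s push of the return address does not change what the runtime reads. -/
theorem ctor_descsIn_push {m : Mem} (h : DescsIn m Gif.Spec.rt.table Gif.Spec.rt.descs) (a : Word) (v : Nat)
    (ha1 : 0x700000 ≤ a.toNat) (ha2 : a.toNat + 8 ≤ 0x800000) :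
    DescsIn (m.writeLE a 8 v) Gif.Spec.rt.table Gif.Spec.rt.descs := by
  intro i hi
  have hi3 : i < 8 := hi
  have htab : Gif.Spec.rt.table = 0x141f00 := rfl
  obtain ⟨h1, h2, h3⟩ := h i hi
  have hw : Mem.NoWrap a 8 := by
    unfold Mem.NoWrap
    omega
  have key : ∀ off : Nat, off + 8 ≤ 64 →
      (m.writeLE a 8 v).readLE (UInt64.ofNat (Gif.Spec.rt.table + 64 * i + off)) 8 =
        m.readLE (UInt64.ofNat (Gif.Spec.rt.table + 64 * i + off)) 8 := by
    intro off hoff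
    have e : (UInt64.ofNat (Gif.Spec.rt.table + 64 * i + off)).toNat = Gif.Spec.rt.table + 64 * i + off := by
      rw [UInt64.toNat_ofNat', htab]
      omega
    apply Mem.readLE_writeLE_disjoint_noWrap _ _ _ _ _ _ hw
    · unfold Mem.NoWrap
      rw [e, htab]
      omega
    · left
      rw [e, htab]
      omega
  refine ⟨?_, ?_, ?_⟩
  · have := key 0 (by omega)
    rw [Nat.add_zero] at this
    rw [this]
    exact h1
  · rw [key 8 (by omega)]
    exact h2
  · rw [key 16 (by omega)]
    exact h3

/-- The shadow windows `__asan_register_globals` may write for the table of this image, as numbers: one per descriptor, in table order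
(`shadowSpan beg (beg + sizeRz)`), so that `u_same` / `u_eqon` / `u_omega` can compare them with the stack. -/
theorem ctor_registerWrites_rt :
    registerWrites Gif.Spec.rt.descs =
      [⟨12747360, 12747368⟩,
       ⟨12747368, 12747376⟩,
       ⟨12747376, 12747384⟩,
       ⟨12747872, 12747880⟩,
       ⟨12747336, 12747344⟩,
       ⟨12747352, 12747360⟩,
       ⟨12747344, 12747352⟩,
       ⟨12747328, 12747336⟩] := by
  rfl

/-- The windows of the callee's contract, as numbers. -/
theorem ctor_registerGlobalsSpec_writes (s : State) :
    (registerGlobalsSpec Gif.Spec.rt).writes s =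
      [⟨12747360, 12747368⟩,
       ⟨12747368, 12747376⟩,
       ⟨12747376, 12747384⟩,
       ⟨12747872, 12747880⟩,
       ⟨12747336, 12747344⟩,
       ⟨12747352, 12747360⟩,
       ⟨12747344, 12747352⟩,
       ⟨12747328, 12747336⟩] :=
  ctor_registerWrites_rt

/-- The windows of the constructor's own contract, as numbers (the same eight). -/
theorem ctor_ctorSpec_writes (s : State) :
    (ctorSpec Gif.Spec.rt).writes s =
      [⟨12747360, 12747368⟩,
       ⟨12747368, 12747376⟩,
       ⟨12747376, 12747384⟩,
       ⟨12747872, 12747880⟩,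
       ⟨12747336, 12747344⟩,
       ⟨12747352, 12747360⟩,
       ⟨12747344, 12747352⟩,
       ⟨12747328, 12747336⟩] :=
  ctor_registerWrites_rt

end Gif.Spec.sub_I_65535_1

/-- `_sub_I_65535_1` (the constructor gcc emitted, gif.c:14) satisfies `Asan.ctorSpec rt`: `sub rsp, 8`, the two constants,
a CALL TO A FUNCTION WITH A CONTRACT (`__asan_register_globals`, whose pre is our pre moved across the push of the return
address), `add rsp, 8 ; ret`. The post (the shadow is that of `registerMem u.mem descs`) follows from the callee's exact post
by `ctor_eqOn_registerMem`. -/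
theorem Gif.Spec.Proved.sub_I_65535_1_ok : Gif.Spec.sub_I_65535_1.Statement := by
  intro Lay hLay μ hμ u₀ hcode hreg u ret he hpre
  v_entry he
  obtain ⟨hdescs, hok⟩ := hpre
  -- 0x10b300 … 0x10b30e: `sub rsp, 8 ; mov esi, 8 ; mov edi, 0x141f00 ; call __asan_register_globals` (gif.c:14)
  u_walk hcode [hμ.vendor] span [ProgX.Base.L.textLo, ProgX.Base.L.textHi] side (v_side)
  · -- call_inv: DF and the MXCSR masks at the callee's entry (`sub` wrote status flags only)
    show X86.User.abiInv _
    refine ProgX.Base.abiInv_of ?_ ?_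
    · rw [w_flags]
      simp only [X86.User.df_setStatus]
      exact he_df
    · rw [w_mxcsr]
      exact he_mx
  · -- the callee's precondition
    refine ⟨?_, ?_, ?_, hok⟩
    · rw [w_rdi]
      rfl
    · rw [w_rsi]
      rfl
    · rw [w_mem]
      exact Gif.Spec.sub_I_65535_1.ctor_descsIn_push hdescs _ _ (by u_omega) (by u_omega)
  -- after the return of `__asan_register_globals` (0x10b313): what its contract says, restated for the returned state
  -- (`w_post` stays closed during the walk: its `s.mem = registerMem …` would be taken for a `w_mem`)
  have w_eq := ProgX.Base.conv_code_eqOn w_code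
  have hdf : s_10b30er.flags .df = false := (show abiInv _ from w_inv).1
  have hmx : s_10b30er.mxcsr &&& 0x1F80 = 0x1F80 := (show abiInv _ from w_inv).2
  simp only [X86.User.Spec.footprint, vspec, w_rsp_10b30e,
    Gif.Spec.sub_I_65535_1.ctor_registerGlobalsSpec_writes] at w_same
  have hsame' : Mem.SameExcept
      [⟨(u.reg .rsp).toNat - 16, (u.reg .rsp).toNat⟩,
        ⟨12747360, 12747368⟩,
        ⟨12747368, 12747376⟩,
        ⟨12747376, 12747384⟩,
        ⟨12747872, 12747880⟩,
        ⟨12747336, 12747344⟩,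
        ⟨12747352, 12747360⟩,
        ⟨12747344, 12747352⟩,
        ⟨12747328, 12747336⟩] u.mem s_10b30er.mem := by
    u_same
  have hs0 : UInt64.ofNat (s_10b30er.mem.readLE (u.reg .rsp) 8) = ret := by
    u_frame he_retAddr
  u_walk hcode [hμ.vendor] span [ProgX.Base.L.textLo, ProgX.Base.L.textHi] side (v_side)
  -- 0x10b317 `ret`: the contract's `Returned`
  refine ReachVia.done ?_
  refine X86.User.Returned.mk w_rip ?_ ?_ ?_ (ProgX.Base.conv_code_in w_eq) ?_ ?_
  · -- rsp: the return address has been popped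
    exact w_rsp
  · -- the callee-saved registers: never written
    u_saved
  · -- the footprint: our 16 bytes of stack and the callee's eight shadow windows
    simp only [X86.User.Spec.footprint, vspec, Gif.Spec.sub_I_65535_1.ctor_ctorSpec_writes]
    rw [w_mem]
    exact hsame'
  · -- DF and the MXCSR masks: the callee's `Returned.inv`; `add` wrote status flags only
    show X86.User.abiInv _
    refine ProgX.Base.abiInv_of ?_ ?_
    · rw [w_flags]
      simp only [X86.User.df_setStatus]
      exact hdf
    · rw [w_mxcsr]
      exact hmx
  · -- the post: the SHADOW is that of `registerMem u.mem descs`. The callee's post is exact for the memory at ITS entry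
    -- (ours + the pushed return address, a stack store); the store sequence does not depend on the memory's content
    obtain ⟨hmem, _⟩ := w_post
    show Mem.EqOn 0xC00000 0xE00000 (registerMem u.mem Gif.Spec.rt.descs) s_10b317.mem
    rw [w_mem, hmem]
    apply Gif.Spec.sub_I_65535_1.ctor_eqOn_registerMem
    rw [w_mem_10b30e]
    exact eqOn_shadow_writeLE _ _ _ _ (by u_omega) (by u_omega)
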